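-- pv_equiv track=rewrite | github.com/GAN-Character-Networks/GAN-Character-Networks | scripts/evaluate_NER.py | merge_special_words
-- ===== SOURCE A (Python) =====
-- def merge_special_words(word_list):
--     merged_list = []
--     current_word = ""
--
--     for word in word_list:
--         if word in ["<", "PER", "</", ">"]:
--             current_word += word
--         else:
--             if current_word:
--                 merged_list.append(current_word)
--                 current_word = ""
--             merged_list.append(word)
--
--     if current_word:
--         merged_list.append(current_word)
--
--     return merged_list
-- ===== SOURCE B (Python) =====
-- from itertools import groupby
--
--
-- def merge_special_words(word_list):
--     specials = {"<", "PER", "</", ">"}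
--     merged_list = []
--     for is_special, group in groupby(word_list, key=lambda w: w in specials):
--         if is_special:
--             merged_list.append("".join(group))
--         else:
--             merged_list.extend(group)
--     return merged_list
-- ===== Notes on version B (the rewrite author's own statement) =====
-- stated objective: idiomatic
-- what changed: Replaces the manual current_word accumulator with boundary-flush logic by an itertools.groupby pass over maximal runs: each special run is joined and appended, non-special runs are extended element-wise.
import Mathlib
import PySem

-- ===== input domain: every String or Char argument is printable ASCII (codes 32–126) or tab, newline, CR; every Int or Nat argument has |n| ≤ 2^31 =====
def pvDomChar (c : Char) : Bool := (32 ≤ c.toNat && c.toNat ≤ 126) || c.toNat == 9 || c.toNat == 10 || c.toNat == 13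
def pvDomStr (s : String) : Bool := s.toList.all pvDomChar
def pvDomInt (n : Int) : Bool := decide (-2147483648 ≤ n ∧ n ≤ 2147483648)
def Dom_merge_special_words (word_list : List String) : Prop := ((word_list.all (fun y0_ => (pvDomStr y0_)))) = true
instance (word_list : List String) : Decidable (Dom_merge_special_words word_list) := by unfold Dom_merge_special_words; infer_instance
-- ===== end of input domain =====

-- B merges maximal runs of special tokens via a groupby-style run recursion instead of A's
-- manual current_word accumulator with boundary flushes (objective: idiomatic; same cost).

-- ===== PORT A =====
-- the loop body of A's for-loop, over the state (merged_list, current_word)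
def pvStepA (p : List String × String) (word : String) : List String × String :=
  if ["<", "PER", "</", ">"].contains word then (p.1, p.2 ++ word)
  else if p.2 ≠ "" then (p.1 ++ [p.2, word], "")
  else (p.1 ++ [word], p.2)

def merge_special_words (word_list : List String) : List String :=
  let st := word_list.foldl pvStepA ([], "")
  if st.2 ≠ "" then st.1 ++ [st.2] else st.1

-- ===== PORT B =====
-- w in {"<", "PER", "</", ">"}  (the groupby key of Source B)
def pvIsSpec (w : String) : Bool := w == "<" || w == "PER" || w == "</" || w == ">"

-- groupby partitions the stream into maximal runs of equal key; a special run is joined,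
-- a non-special run is emitted element by element
def merge_special_words_alt : List String → List String
  | [] => []
  | w :: ws =>
    if pvIsSpec w then
      String.join (w :: ws.takeWhile pvIsSpec) :: merge_special_words_alt (ws.dropWhile pvIsSpec)
    else
      w :: merge_special_words_alt ws
termination_by l => l.length
decreasing_by
  · exact Nat.lt_succ_of_le (List.length_dropWhile_le pvIsSpec ws)
  · simp

-- ===== PRECONDITION & SPEC =====
def Spec_merge_special_words (word_list : List String) (out : List String) : Prop := out = merge_special_words_alt word_list
instance (word_list : List String) (out : List String) : Decidable (Spec_merge_special_words word_list out) := by unfold Spec_merge_special_words; infer_instance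

-- ===== CLAIM (what is proved, stated in full; the proofs are below) =====
def Claim_equal_merge_special_words : Prop := ∀ (word_list : List String), Dom_merge_special_words word_list → Spec_merge_special_words word_list (merge_special_words word_list)

-- ===== LEMMAS AND PROOFS =====

theorem pv_contains_eq_isSpec (w : String) :
    (["<", "PER", "</", ">"].contains w) = pvIsSpec w := by
  simp only [List.contains, List.elem_cons, List.elem_nil, pvIsSpec]
  cases w == "<" <;> cases w == "PER" <;> cases w == "</" <;> cases w == ">" <;> rfl

theorem pv_isSpec_ne_empty (w : String) (h : pvIsSpec w = true) : w ≠ "" := by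
  intro hc; subst hc; simp [pvIsSpec] at h

theorem pv_append_ne_empty (a b : String) (h : b ≠ "") : a ++ b ≠ "" := by
  intro hc
  have := congrArg String.length hc
  simp [String.length_append] at this
  exact h this.2

theorem pv_foldl_append (xs : List String) (a b : String) :
    xs.foldl (fun r s => r ++ s) (a ++ b) = a ++ xs.foldl (fun r s => r ++ s) b := by
  induction xs generalizing b with
  | nil => rfl
  | cons x xs ih => simpa [String.append_assoc] using ih (b ++ x)

theorem pv_join_cons (a : String) (xs : List String) :
    String.join (a :: xs) = a ++ String.join xs := by
  simpa [String.join] using pv_foldl_append xs a ""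

-- continuation value: the result of B when a special run with accumulated prefix cw is open
def pvCont (cw : String) (l : List String) : List String :=
  (cw ++ String.join (l.takeWhile pvIsSpec)) :: merge_special_words_alt (l.dropWhile pvIsSpec)

theorem pv_main (l : List String) (acc : List String) (cw : String) :
    (let st := l.foldl pvStepA (acc, cw)
     if st.2 ≠ "" then st.1 ++ [st.2] else st.1)
      = acc ++ (if cw = "" then merge_special_words_alt l else pvCont cw l) := by
  induction l generalizing acc cw with
  | nil =>
    by_cases h : cw = "" <;>
      simp [pvCont, merge_special_words_alt, String.join, h]
  | cons w ws ih =>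
    simp only [List.foldl_cons]
    by_cases hs : pvIsSpec w = true
    · have hw : w ≠ "" := pv_isSpec_ne_empty w hs
      have hstep : pvStepA (acc, cw) w = (acc, cw ++ w) := by
        simp only [pvStepA, pv_contains_eq_isSpec, hs, if_true]
      have hne : cw ++ w ≠ "" := pv_append_ne_empty cw w hw
      rw [hstep, ih]
      by_cases hcw : cw = ""
      · subst hcw
        simp [hw, pvCont, merge_special_words_alt, hs, pv_join_cons]
      · simp [hne, hcw, pvCont, hs, pv_join_cons, String.append_assoc]
    · have hs' : pvIsSpec w = false := by simpa using hs
      by_cases hcw : cw = ""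
      · have hstep : pvStepA (acc, cw) w = (acc ++ [w], cw) := by
          simp only [pvStepA, pv_contains_eq_isSpec, hs', Bool.false_eq_true, if_false]
          simp [hcw]
        rw [hstep, ih]
        simp [hcw, merge_special_words_alt, hs']
      · have hstep : pvStepA (acc, cw) w = (acc ++ [cw, w], "") := by
          simp only [pvStepA, pv_contains_eq_isSpec, hs', Bool.false_eq_true, if_false]
          simp [hcw]
        rw [hstep, ih]
        simp [hcw, pvCont, hs', merge_special_words_alt, String.join]

-- ===== VERDICT (by name: the statement is the Claim_ definition above) =====
theorem merge_special_words_spec : Claim_equal_merge_special_words := by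
  intro word_list _
  unfold Spec_merge_special_words merge_special_words
  simpa using pv_main word_list [] ""
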